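-- pv_equiv track=rewrite | github.com/vigneshsabapathi/python-algorithms | conversions/binary_to_octal.py | binary_to_octal
-- ===== SOURCE A (Python) =====
-- def binary_to_octal(binary_string: str) -> str:
--     """
--     Convert a binary string to octal.
--
--     >>> binary_to_octal("101")
--     '0o5'
--     >>> binary_to_octal("1111")
--     '0o17'
--     >>> binary_to_octal("1000")
--     '0o10'
--     >>> binary_to_octal("0")
--     '0o0'
--     >>> binary_to_octal("")
--     Traceback (most recent call last):
--         ...
--     ValueError: Empty string is not a valid binary number
--     >>> binary_to_octal("2")
--     Traceback (most recent call last):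
--         ...
--     ValueError: Non-binary value was passed to the function
--     """
--     if not binary_string:
--         raise ValueError("Empty string is not a valid binary number")
--     if not all(char in "01" for char in binary_string):
--         raise ValueError("Non-binary value was passed to the function")
--
--     # Pad to multiple of 3
--     padded = binary_string.zfill((len(binary_string) + 2) // 3 * 3)
--
--     octal_digits = []
--     for i in range(0, len(padded), 3):
--         group = padded[i : i + 3]
--         octal_digits.append(str(int(group, 2)))
--
--     octal_string = "".join(octal_digits).lstrip("0") or "0"
--     return "0o" + octal_string
-- ===== SOURCE B (Python) =====
-- def binary_to_octal(binary_string: str) -> str: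
--     if not binary_string:
--         raise ValueError("Empty string is not a valid binary number")
--     if not all(char in "01" for char in binary_string):
--         raise ValueError("Non-binary value was passed to the function")
--
--     value = 0
--     for char in binary_string:
--         value = value * 2 + (char == "1")
--
--     digits = ""
--     while value >= 8:
--         digits = str(value % 8) + digits
--         value //= 8
--     return "0o" + str(value) + digits
-- ===== Notes on version B (the rewrite author's own statement) =====
-- stated objective: simpler
-- what changed: B drops A's zfill-pad / 3-bit-grouping / per-group str(int(group,2)) / join / lstrip string pipeline and instead computes the numeric value with one Horner pass over the characters and emits octal digits with a divmod loop.
import Mathlib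
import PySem

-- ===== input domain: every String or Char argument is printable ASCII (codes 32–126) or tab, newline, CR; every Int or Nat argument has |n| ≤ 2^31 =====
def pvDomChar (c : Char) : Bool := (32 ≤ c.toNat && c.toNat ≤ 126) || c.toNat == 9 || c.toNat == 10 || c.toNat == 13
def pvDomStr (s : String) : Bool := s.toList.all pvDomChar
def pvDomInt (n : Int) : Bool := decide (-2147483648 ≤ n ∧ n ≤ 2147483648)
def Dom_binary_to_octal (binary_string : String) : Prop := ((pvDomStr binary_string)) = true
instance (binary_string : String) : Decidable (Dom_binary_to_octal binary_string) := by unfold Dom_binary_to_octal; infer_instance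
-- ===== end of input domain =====

-- B replaces A's zfill / 3-bit-grouping / join / lstrip string pipeline by a single Horner
-- pass computing the numeric value and a divmod loop emitting octal digits (objective: simpler).

-- ===== PORT A =====
-- Port of A. The two ValueError branches (empty string, non-binary char) are excluded by
-- Pre_binary_to_octal; the port returns "" there.  int(group, 2) in the loop cannot fail on
-- Pre_ inputs (the group is a non-empty binary string), so its Option is read with .getD 0.
-- .lstrip("0") is ported as dropWhile (== '0'), exact for a single strip character;
-- `or "0"` is the if on the empty list (Python's falsy empty string).
def binary_to_octal (binary_string : String) : String :=
  let cs := binary_string.toList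
  if cs = [] then ""
  else if !(cs.all fun c => decide (c ∈ (['0', '1'] : List Char))) then ""
  else
    let padded := PySem.Chars.zfill cs (PySem.Int.floordiv ((cs.length : Int) + 2) 3 * 3)
    let octal_digits := (PySem.List.pyRange 0 (padded.length : Int) 3).foldl
      (fun acc i => acc ++
        [PySem.Int.toChars ((PySem.Int.ofCharsBase? (PySem.List.slice padded (some i) (some (i + 3))) 2).getD 0)])
      ([] : List (List Char))
    let octal_string := (PySem.Chars.join [] octal_digits).dropWhile (fun c => c == '0')
    String.mk ('0' :: 'o' :: (if octal_string = [] then ['0'] else octal_string))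

-- ===== PORT B =====
-- the `while value >= 8` loop of Source B, fused with the final `str(value) + digits` of the return
def octLoop (value : Int) (digits : List Char) : List Char :=
  if 8 ≤ value then
    octLoop (PySem.Int.floordiv value 8) (PySem.Int.toChars (PySem.Int.mod value 8) ++ digits)
  else
    PySem.Int.toChars value ++ digits
termination_by value.toNat
decreasing_by
  simp only [PySem.Int.floordiv]
  rw [Int.fdiv_eq_ediv, if_pos (Or.inl (by norm_num : (0:Int) ≤ 8))]
  omega

-- Port of B (Source B).  Same two guards as A (excluded by Pre_, "" there); then the Horner fold
-- (`value = value * 2 + (char == "1")`, a Python bool counting 1) and the divmod loop.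
def binary_to_octal_alt (binary_string : String) : String :=
  let cs := binary_string.toList
  if cs = [] then ""
  else if !(cs.all fun c => decide (c ∈ (['0', '1'] : List Char))) then ""
  else
    let value := cs.foldl (fun a c => a * 2 + (if c = '1' then 1 else 0)) (0 : Int)
    String.mk ('0' :: 'o' :: octLoop value [])

-- ===== PRECONDITION & SPEC =====
-- Pre_ excludes exactly the inputs on which A raises ValueError: the empty string and
-- strings containing a character other than '0'/'1'.
def Pre_binary_to_octal (binary_string : String) : Prop :=
  binary_string.toList ≠ [] ∧
    (binary_string.toList.all fun c => c == '0' || c == '1') = true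
instance (binary_string : String) : Decidable (Pre_binary_to_octal binary_string) := by
  unfold Pre_binary_to_octal; infer_instance

def pvWitness_binary_to_octal : String := "101"

def Spec_binary_to_octal (binary_string : String) (out : String) : Prop :=
  out = binary_to_octal_alt binary_string
instance (binary_string : String) (out : String) : Decidable (Spec_binary_to_octal binary_string out) := by
  unfold Spec_binary_to_octal; infer_instance

-- ===== CLAIM (what is proved, stated in full; the proofs are below) =====
def Claim_equal_binary_to_octal : Prop := ∀ (binary_string : String),
  Dom_binary_to_octal binary_string → Pre_binary_to_octal binary_string →
  Spec_binary_to_octal binary_string (binary_to_octal binary_string)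

-- ===== LEMMAS AND PROOFS =====

def bitv (c : Char) : Nat := if c = '1' then 1 else 0

def valb (a : Nat) (xs : List Char) : Nat := xs.foldl (fun x c => x * 2 + bitv c) a

def ofOct (a : Nat) (ds : List Nat) : Nat := ds.foldl (fun x d => x * 8 + d) a

def digitChar (n : Nat) : Char := Char.ofNat (48 + n)

def octRep (n : Nat) : List Char :=
  if n < 8 then [digitChar n]
  else octRep (n / 8) ++ [digitChar (n % 8)]
termination_by n
decreasing_by omega

def chunkVals : List Char → List Nat
  | a :: b :: c :: r => valb 0 [a, b, c] :: chunkVals r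
  | _ => []

lemma foldl_push {α β : Type} (h : α → β) :
    ∀ (l : List α) (acc : List β), l.foldl (fun a x => a ++ [h x]) acc = acc ++ l.map h := by
  intro l
  induction l with
  | nil => simp
  | cons x t ih => intro acc; simp [List.foldl_cons, ih]

lemma valb_from (xs : List Char) : ∀ (a : Nat), valb a xs = a * 2 ^ xs.length + valb 0 xs := by
  induction xs with
  | nil => simp [valb]
  | cons c t ih =>
    intro a
    simp only [valb, List.foldl_cons] at *
    rw [ih (a * 2 + bitv c), ih (0 * 2 + bitv c)]
    simp [List.length_cons, pow_succ]
    ring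

lemma ofOct_from (ds : List Nat) : ∀ (a : Nat), ofOct a ds = a * 8 ^ ds.length + ofOct 0 ds := by
  induction ds with
  | nil => simp [ofOct]
  | cons d t ih =>
    intro a
    simp only [ofOct, List.foldl_cons] at *
    rw [ih (a * 8 + d), ih (0 * 8 + d)]
    simp [List.length_cons, pow_succ]
    ring

lemma valb_rep0 (m : Nat) : valb 0 (List.replicate m '0') = 0 := by
  induction m with
  | zero => simp [valb]
  | succ k ih => simpa [valb, List.replicate_succ, bitv] using ih

lemma valb_append (xs ys : List Char) (a : Nat) : valb a (xs ++ ys) = valb (valb a xs) ys := by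
  simp [valb, List.foldl_append]

lemma chunkVals_length : ∀ xs : List Char, (chunkVals xs).length = xs.length / 3 := by
  intro xs
  induction xs using chunkVals.induct with
  | case1 a b c r ih => simp [chunkVals, ih]; omega
  | case2 xs h => cases xs with
    | nil => simp [chunkVals]
    | cons a t => cases t with
      | nil => simp [chunkVals]
      | cons b u => cases u with
        | nil => simp [chunkVals]
        | cons c r => exact absurd rfl (h a b c r)

lemma valb3_lt8 (a b c : Char) : valb 0 [a, b, c] < 8 := by
  have ha : bitv a ≤ 1 := by unfold bitv; split <;> omega
  have hb : bitv b ≤ 1 := by unfold bitv; split <;> omega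
  have hc : bitv c ≤ 1 := by unfold bitv; split <;> omega
  simp [valb]
  omega

lemma chunkVals_lt8 : ∀ xs : List Char, ∀ v ∈ chunkVals xs, v < 8 := by
  intro xs
  induction xs using chunkVals.induct with
  | case1 a b c r ih =>
    intro v hv
    rcases (List.mem_cons.mp hv) with h | h
    · subst h; exact valb3_lt8 a b c
    · exact ih v h
  | case2 xs h => cases xs with
    | nil => simp [chunkVals]
    | cons a t => cases t with
      | nil => simp [chunkVals]
      | cons b u => cases u with
        | nil => simp [chunkVals]
        | cons c r => exact absurd rfl (h a b c r)

lemma valb_chunks : ∀ (m : Nat) (xs : List Char), xs.length = 3 * m →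
    valb 0 xs = ofOct 0 (chunkVals xs) := by
  intro m
  induction m with
  | zero =>
    intro xs h
    have : xs = [] := List.eq_nil_of_length_eq_zero (by omega)
    subst this; simp [valb, ofOct, chunkVals]
  | succ k ih =>
    intro xs h
    match xs, h with
    | a :: b :: c :: r, h =>
      have hr : r.length = 3 * k := by simp at h; omega
      have h1 : valb 0 (a :: b :: c :: r) = valb (valb 0 [a, b, c]) r := by
        simpa using valb_append [a, b, c] r 0
      rw [h1, valb_from r, ih r hr]
      have hcv : chunkVals (a :: b :: c :: r) = valb 0 [a, b, c] :: chunkVals r := rfl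
      rw [hcv]
      have h2 : ofOct 0 (valb 0 [a, b, c] :: chunkVals r)
          = (valb 0 [a, b, c]) * 8 ^ (chunkVals r).length + ofOct 0 (chunkVals r) := by
        have h3 : ofOct 0 (valb 0 [a, b, c] :: chunkVals r) = ofOct (valb 0 [a, b, c]) (chunkVals r) := by
          simp [ofOct]
        rw [h3, ofOct_from]
      rw [h2, chunkVals_length r, hr]
      have : (8 : Nat) ^ (3 * k / 3) = 2 ^ (3 * k) := by
        rw [Nat.mul_div_cancel_left k (by norm_num)]
        rw [show (8 : Nat) = 2 ^ 3 by norm_num, ← pow_mul]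
      rw [this]

-- int(group, 2) on a 3-char binary group, and str() of its value: the eight cases
lemma g3_eval (a b c : Char) (ha : a = '0' ∨ a = '1') (hb : b = '0' ∨ b = '1')
    (hc : c = '0' ∨ c = '1') :
    PySem.Int.toChars ((PySem.Int.ofCharsBase? [a, b, c] 2).getD 0) = [digitChar (valb 0 [a, b, c])] := by
  rcases ha with rfl | rfl <;> rcases hb with rfl | rfl <;> rcases hc with rfl | rfl <;> decide

lemma chunk_map (m : Nat) : ∀ (xs : List Char), xs.length = 3 * m → (∀ c ∈ xs, c = '0' ∨ c = '1') →
    (List.range m).map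
      (fun k => PySem.Int.toChars ((PySem.Int.ofCharsBase? (List.take 3 (List.drop (3 * k) xs)) 2).getD 0))
    = (chunkVals xs).map (fun v => [digitChar v]) := by
  induction m with
  | zero =>
    intro xs h _
    have : xs = [] := List.eq_nil_of_length_eq_zero (by omega)
    subst this; simp [chunkVals]
  | succ k ih =>
    intro xs h hbin
    match xs, h with
    | a :: b :: c :: r, h =>
      have hr : r.length = 3 * k := by simp at h; omega
      rw [List.range_succ_eq_map, List.map_cons, List.map_map]
      have hhead : PySem.Int.toChars
          ((PySem.Int.ofCharsBase? (List.take 3 (List.drop (3 * 0) (a :: b :: c :: r))) 2).getD 0)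
          = [digitChar (valb 0 [a, b, c])] := by
        have : List.take 3 (List.drop (3 * 0) (a :: b :: c :: r)) = [a, b, c] := by simp
        rw [this]
        exact g3_eval a b c (hbin a (by simp)) (hbin b (by simp)) (hbin c (by simp))
      have htail : (List.range k).map
          ((fun j => PySem.Int.toChars ((PySem.Int.ofCharsBase? (List.take 3 (List.drop (3 * j) (a :: b :: c :: r))) 2).getD 0)) ∘ Nat.succ)
          = (chunkVals r).map (fun v => [digitChar v]) := by
        rw [show ((fun j => PySem.Int.toChars ((PySem.Int.ofCharsBase? (List.take 3 (List.drop (3 * j) (a :: b :: c :: r))) 2).getD 0)) ∘ Nat.succ)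
            = fun j => PySem.Int.toChars ((PySem.Int.ofCharsBase? (List.take 3 (List.drop (3 * j) r)) 2).getD 0) from ?_]
        · exact ih r hr (fun x hx => hbin x (by simp [hx]))
        · funext j
          have : List.drop (3 * (j + 1)) (a :: b :: c :: r) = List.drop (3 * j) r := by
            rw [show 3 * (j + 1) = 3 * j + 3 by ring]
            rfl
          simp [Function.comp, this]
      rw [hhead, htail]
      rfl

lemma dw_map (ds : List Nat) (h8 : ∀ d ∈ ds, d < 8) :
    List.dropWhile (fun c => c == '0') (ds.map digitChar)
    = (List.dropWhile (fun d => d == 0) ds).map digitChar := by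
  induction ds with
  | nil => simp
  | cons d t ih =>
    have hd : d < 8 := h8 d (by simp)
    have heq : ((digitChar d == '0') : Bool) = (d == 0) := by
      interval_cases d <;> decide
    simp only [List.map_cons, List.dropWhile_cons, heq]
    split
    · exact ih (fun x hx => h8 x (by simp [hx]))
    · rfl

lemma ofOct_zero_of_all (ds : List Nat) (h : ∀ x ∈ ds, x = 0) : ofOct 0 ds = 0 := by
  induction ds with
  | nil => rfl
  | cons d t ih =>
    have : d = 0 := h d (by simp)
    subst this
    simpa [ofOct] using ih (fun x hx => h x (by simp [hx]))

lemma ofOct_all_zero : ∀ (ds : List Nat) (a : Nat), ofOct a ds = 0 → a = 0 ∧ ∀ x ∈ ds, x = 0 := by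
  intro ds
  induction ds with
  | nil => intro a h; exact ⟨h, by simp⟩
  | cons d t ih =>
    intro a h
    have h' := ih (a * 8 + d) h
    obtain ⟨h1, h2⟩ := h'
    refine ⟨by omega, ?_⟩
    intro x hx
    rcases List.mem_cons.mp hx with rfl | hx
    · omega
    · exact h2 x hx

lemma octRep_small (n : Nat) (h : n < 8) : octRep n = [digitChar n] := by
  rw [octRep]; simp [h]

lemma octRep_step (n : Nat) (h : 8 ≤ n) : octRep n = octRep (n / 8) ++ [digitChar (n % 8)] := by
  rw [octRep]; simp [Nat.not_lt.mpr h]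

lemma ofOct_append_singleton (ds : List Nat) (d : Nat) :
    ofOct 0 (ds ++ [d]) = ofOct 0 ds * 8 + d := by
  simp [ofOct, List.foldl_append]

lemma octRep_ofOct : ∀ ds : List Nat, ds ≠ [] → (∀ d ∈ ds, d < 8) →
    octRep (ofOct 0 ds) =
      if List.dropWhile (fun d => d == 0) ds = [] then ['0']
      else (List.dropWhile (fun d => d == 0) ds).map digitChar := by
  intro ds
  induction ds using List.reverseRecOn with
  | nil => intro h; exact absurd rfl h
  | append_singleton t d ih =>
    intro _ h8
    have hd : d < 8 := h8 d (by simp)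
    rw [ofOct_append_singleton]
    by_cases hz : ofOct 0 t = 0
    · have hall : ∀ x ∈ t, x = 0 := (ofOct_all_zero t 0 hz).2
      have hdw : List.dropWhile (fun d => d == 0) t = [] := by
        rw [List.dropWhile_eq_nil_iff]
        intro x hx; simp [hall x hx]
      rw [hz, List.dropWhile_append, hdw]
      simp only [List.isEmpty_nil, if_true]
      rw [show 0 * 8 + d = d by omega, octRep_small d (by omega)]
      by_cases hd0 : d = 0
      · subst hd0; simp [digitChar]
      · simp [hd0]
    · have hpos : 1 ≤ ofOct 0 t := by omega
      have hge : 8 ≤ ofOct 0 t * 8 + d := by omega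
      rw [octRep_step _ hge]
      have hq : (ofOct 0 t * 8 + d) / 8 = ofOct 0 t := by omega
      have hr : (ofOct 0 t * 8 + d) % 8 = d := by omega
      rw [hq, hr]
      have ht8 : ∀ x ∈ t, x < 8 := fun x hx => h8 x (by simp [hx])
      have htne : t ≠ [] := by
        rintro rfl; simp [ofOct] at hz
      have hdwne : List.dropWhile (fun d => d == 0) t ≠ [] := by
        rw [Ne, List.dropWhile_eq_nil_iff]
        intro hall
        exact hz (ofOct_zero_of_all t (fun x hx => by simpa using hall x hx))
      have hem : (List.dropWhile (fun d => d == 0) t).isEmpty = false := by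
        cases hdq : List.dropWhile (fun d => d == 0) t with
        | nil => exact absurd hdq hdwne
        | cons a l => rfl
      rw [ih htne ht8, if_neg hdwne, List.dropWhile_append, hem]
      simp

lemma valInt (xs : List Char) : ∀ (a : Nat),
    xs.foldl (fun x c => x * 2 + (if c = '1' then 1 else 0)) ((a : Nat) : Int) = ((valb a xs : Nat) : Int) := by
  induction xs with
  | nil => intro a; simp [valb]
  | cons c t ih =>
    intro a
    simp only [List.foldl_cons, valb, bitv] at *
    have : ((a : Int) * 2 + (if c = '1' then 1 else 0)) = (((a * 2 + if c = '1' then 1 else 0 : Nat) : Nat) : Int) := by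
      split <;> push_cast <;> ring
    rw [this, ih]

lemma octLoop_eq : ∀ (n : Nat) (acc : List Char), octLoop (n : Int) acc = octRep n ++ acc := by
  intro n
  induction n using Nat.strong_induction_on with
  | _ n ih =>
    intro acc
    rw [octLoop]
    by_cases h : 8 ≤ n
    · have h8 : (8 : Int) ≤ (n : Int) := by exact_mod_cast h
      rw [if_pos h8]
      have hfd : PySem.Int.floordiv (n : Int) 8 = ((n / 8 : Nat) : Int) := by
        simp only [PySem.Int.floordiv]
        rw [Int.fdiv_eq_ediv, if_pos (Or.inl (by norm_num : (0:Int) ≤ 8))]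
        omega
      have hfm : PySem.Int.mod (n : Int) 8 = ((n % 8 : Nat) : Int) := by
        simp only [PySem.Int.mod]
        rw [Int.fmod_eq_emod, if_pos (Or.inl (by norm_num : (0:Int) ≤ 8))]
        omega
      have hmch : PySem.Int.toChars ((n % 8 : Nat) : Int) = [digitChar (n % 8)] := by
        have : n % 8 < 8 := Nat.mod_lt _ (by norm_num)
        generalize hv : n % 8 = v at *
        interval_cases v <;> decide
      rw [hfd, hfm, hmch, ih (n / 8) (by omega)]
      rw [octRep_step n h]
      simp
    · have h8 : ¬ (8 : Int) ≤ (n : Int) := by exact_mod_cast h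
      rw [if_neg h8]
      have : PySem.Int.toChars ((n : Nat) : Int) = [digitChar n] := by
        have hn : n < 8 := by omega
        interval_cases n <;> decide
      rw [this, octRep_small n (by omega)]

lemma zfill_eq (cs : List Char) (hne : cs ≠ []) (hb : ∀ c ∈ cs, c = '0' ∨ c = '1')
    (w : Nat) (hw : cs.length ≤ w) :
    PySem.Chars.zfill cs ((w : Nat) : Int) = List.replicate (w - cs.length) '0' ++ cs := by
  rw [PySem.Chars.zfill.eq_def]
  split
  · next h =>
    have h' : w ≤ cs.length := by exact_mod_cast h
    have : w = cs.length := by omega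
    subst this
    simp
  · next h =>
    cases cs with
    | nil => cases hne rfl
    | cons c rest =>
      have hc := hb c (by simp)
      have hns : ¬ (c = '+' ∨ c = '-') := by
        rcases hc with rfl | rfl <;> decide
      simp [hns]

-- ===== VERDICT (by name: the statement is the Claim_ definition above) =====
theorem binary_to_octal_spec : Claim_equal_binary_to_octal := by
  intro s _hdom hpre
  obtain ⟨hne, hballb⟩ := hpre
  have hb : ∀ c ∈ s.toList, c = '0' ∨ c = '1' := by
    intro c hc
    have := List.all_eq_true.mp hballb c hc
    simpa using this
  unfold Spec_binary_to_octal binary_to_octal binary_to_octal_alt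
  set cs := s.toList with hcs
  have hall : (cs.all fun c => decide (c ∈ (['0', '1'] : List Char))) = true := by
    rw [List.all_eq_true]
    intro c hc
    rcases hb c hc with rfl | rfl <;> simp
  rw [if_neg hne, if_neg hne, hall]
  simp only [Bool.not_true, Bool.false_eq_true, if_false]
  -- arithmetic for the pad width
  have hL : 1 ≤ cs.length := by
    have h0 : cs.length ≠ 0 := fun h0 => hne (List.eq_nil_of_length_eq_zero h0)
    omega
  set m := (cs.length + 2) / 3 with hm
  have hm1 : 1 ≤ m := by omega
  have hLm : cs.length ≤ 3 * m := by omega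
  have hWint : PySem.Int.floordiv ((cs.length : Int) + 2) 3 * 3 = ((3 * m : Nat) : Int) := by
    simp only [PySem.Int.floordiv]
    rw [Int.fdiv_eq_ediv, if_pos (Or.inl (by norm_num : (0:Int) ≤ 3))]
    omega
  rw [hWint, zfill_eq cs hne hb (3 * m) hLm]
  set padded := List.replicate (3 * m - cs.length) '0' ++ cs with hpad
  have hplen : padded.length = 3 * m := by
    simp [hpad]
    omega
  have hpb : ∀ c ∈ padded, c = '0' ∨ c = '1' := by
    intro c hc
    rcases List.mem_append.mp hc with h | h
    · left; exact List.eq_of_mem_replicate h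
    · exact hb c h
  -- the A loop
  rw [hplen, PySem.List.pyRange_of_pos _ _ (by norm_num : (0:Int) < 3)]
  have hcount : (if (0 : Int) < ((3 * m : Nat) : Int)
      then ((((3 * m : Nat) : Int) - 0 + 3 - 1) / 3).toNat else 0) = m := by
    rw [if_pos (by push_cast; omega)]
    push_cast
    omega
  rw [hcount, List.foldl_map, foldl_push]
  have hslice : ∀ k : Nat,
      PySem.List.slice padded (some ((0 : Int) + 3 * (k : Int))) (some ((0 : Int) + 3 * (k : Int) + 3))
        = List.take 3 (List.drop (3 * k) padded) := by
    intro k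
    have h1 : ((0 : Int) + 3 * (k : Int)) = ((3 * k : Nat) : Int) := by push_cast; ring
    rw [h1, show ((3 * k : Nat) : Int) + 3 = ((3 * k : Nat) : Int) + ((3 : Nat) : Int) by norm_num,
      PySem.List.slice_natCast_add]
  rw [List.map_congr_left (fun k _ => by rw [hslice k])]
  rw [chunk_map m padded hplen hpb]
  simp only [List.nil_append]
  -- join of singleton strings
  have hjoin : PySem.Chars.join [] ((chunkVals padded).map (fun v => [digitChar v]))
      = (chunkVals padded).map digitChar := by
    rw [show ((chunkVals padded).map (fun v => [digitChar v]))
        = (((chunkVals padded).map digitChar).map (fun c => [c])) by rw [List.map_map]; rfl]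
    exact PySem.Chars.join_nil_singletons _
  rw [hjoin, dw_map _ (chunkVals_lt8 padded)]
  -- the B value
  have hv : cs.foldl (fun a c => a * 2 + (if c = '1' then 1 else 0)) (0 : Int)
      = ((valb 0 cs : Nat) : Int) := by
    have := valInt cs 0
    simpa using this
  rw [hv, octLoop_eq (valb 0 cs) []]
  -- valb cs = ofOct (chunkVals padded)
  have hvp : valb 0 cs = valb 0 padded := by
    rw [hpad, valb_append, valb_rep0]
  have hvo : valb 0 cs = ofOct 0 (chunkVals padded) := by
    rw [hvp]; exact valb_chunks m padded hplen
  rw [hvo]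
  have hcne : chunkVals padded ≠ [] := by
    intro h
    have := chunkVals_length padded
    rw [h, hplen] at this
    simp at this
    omega
  rw [octRep_ofOct (chunkVals padded) hcne (chunkVals_lt8 padded)]
  -- both sides are now the same if/then/else up to map_eq_nil
  rcases hdw : List.dropWhile (fun d => d == 0) (chunkVals padded) with _ | ⟨d, t⟩
  · simp
  · simp
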